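-- pv_equiv track=rewrite | github.com/breezy-team/vcsgraph | vcsgraph/graph.py | _remove_simple_descendants
-- ===== SOURCE A (Python) =====
-- def _remove_simple_descendants(revisions, parent_map):
--     """Remove revisions which are children of other ones in the set.
--
--     This doesn't do any graph searching, it just checks the immediate
--     parent_map to find if there are any children which can be removed.
--
--     :param revisions: A set of revision_ids
--     :return: A set of revision_ids with the children removed
--     """
--     simple_ancestors = set(revisions)
--     for revision, parent_ids in parent_map.items():
--         if parent_ids is None:
--             continue
--         for parent_id in parent_ids:
--             if parent_id in revisions:
--                 simple_ancestors.discard(revision)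
--                 break
--     return simple_ancestors
-- ===== SOURCE B (Python) =====
-- def _remove_simple_descendants(revisions, parent_map):
--     """Remove revisions which are children of other ones in the set.
--
--     Builds a reverse (parent -> children) index once, then walks the
--     revisions set and discards every recorded child of a member.
--     """
--     pairs = [(parent_id, revision)
--              for revision, parent_ids in parent_map.items()
--              if parent_ids is not None
--              for parent_id in parent_ids]
--     children = {}
--     for parent_id, revision in pairs:
--         children.setdefault(parent_id, []).append(revision)
--     result = set(revisions)
--     for r in revisions:
--         for child in children.get(r, ()):
--             result.discard(child)
--     return result
-- ===== Notes on version B (the rewrite author's own statement) =====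
-- stated objective: alternative
-- what changed: B builds a reverse parent->children index from parent_map once and then traverses the revisions set discarding recorded children, instead of A's direct scan over parent_map entries testing each entry's parents against the set.
import Mathlib
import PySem

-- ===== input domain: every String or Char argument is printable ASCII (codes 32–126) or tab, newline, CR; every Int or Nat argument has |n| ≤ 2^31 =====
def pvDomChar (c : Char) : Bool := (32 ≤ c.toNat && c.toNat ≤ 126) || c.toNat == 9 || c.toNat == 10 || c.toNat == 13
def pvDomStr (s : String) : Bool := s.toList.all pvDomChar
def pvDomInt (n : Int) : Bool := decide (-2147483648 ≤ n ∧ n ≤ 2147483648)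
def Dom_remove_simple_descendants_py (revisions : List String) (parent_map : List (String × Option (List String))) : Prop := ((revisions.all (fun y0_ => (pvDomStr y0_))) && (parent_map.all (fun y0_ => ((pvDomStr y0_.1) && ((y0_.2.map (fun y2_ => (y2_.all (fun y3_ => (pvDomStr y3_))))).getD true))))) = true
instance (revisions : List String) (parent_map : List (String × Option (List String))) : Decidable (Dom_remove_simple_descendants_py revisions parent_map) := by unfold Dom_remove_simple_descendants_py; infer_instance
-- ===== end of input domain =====

-- B replaces A's direct scan of parent_map (testing each entry's parents against the set)
-- by a reverse parent→children index built once, then traverses the revisions set and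
-- discards the recorded children of its members (objective: alternative, not faster).

-- ===== PORT A =====
def remove_simple_descendants_py (revisions : List String) (parent_map : List (String × Option (List String))) : List String :=
  parent_map.foldl (fun simple_ancestors e =>
    match e.2 with
    | none => simple_ancestors
    | some parent_ids =>
        -- 'for parent_id in parent_ids: if parent_id in revisions: discard; break' = any
        if parent_ids.any (fun parent_id => revisions.contains parent_id) then
          PySem.Set.discard simple_ancestors e.1
        else simple_ancestors)
    (PySem.Set.ofList revisions)

-- ===== PORT B =====
-- the flat [(parent_id, revision)] comprehension of Source B
def pvPairs (parent_map : List (String × Option (List String))) : List (String × String) :=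
  parent_map.flatMap (fun e =>
    match e.2 with
    | none => []
    | some parent_ids => parent_ids.map (fun parent_id => (parent_id, e.1)))

-- children.setdefault(parent_id, []).append(revision) over the pairs
def pvChildrenIdx (parent_map : List (String × Option (List String))) : PySem.Dict String (List String) :=
  (pvPairs parent_map).foldl (fun children p => children.modify p.1 [] (fun l => l ++ [p.2])) PySem.Dict.empty

def remove_simple_descendants_py_alt (revisions : List String) (parent_map : List (String × Option (List String))) : List String :=
  let children := pvChildrenIdx parent_map
  revisions.foldl (fun result r =>
      (children.getD r []).foldl (fun result child => PySem.Set.discard result child) result)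
    (PySem.Set.ofList revisions)

-- ===== PRECONDITION & SPEC =====
def Spec_remove_simple_descendants_py (revisions : List String) (parent_map : List (String × Option (List String))) (out : List String) : Prop := out = remove_simple_descendants_py_alt revisions parent_map
instance (revisions : List String) (parent_map : List (String × Option (List String))) (out : List String) : Decidable (Spec_remove_simple_descendants_py revisions parent_map out) := by unfold Spec_remove_simple_descendants_py; infer_instance

-- ===== CLAIM (what is proved, stated in full; the proofs are below) =====
def Claim_equal_remove_simple_descendants_py : Prop := ∀ (revisions : List String) (parent_map : List (String × Option (List String))), Dom_remove_simple_descendants_py revisions parent_map → Spec_remove_simple_descendants_py revisions parent_map (remove_simple_descendants_py revisions parent_map)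

-- ===== LEMMAS AND PROOFS =====

-- whether an entry of parent_map has a parent in `revisions` (A's inner test)
def pvHit (revisions : List String) (e : String × Option (List String)) : Bool :=
  match e.2 with
  | none => false
  | some parent_ids => parent_ids.any (fun parent_id => revisions.contains parent_id)

theorem pv_beq_comm (x r : String) : (x == r) = (r == x) := by
  rw [BEq.comm]

-- a fold of discards is a filter
theorem pv_foldl_discard (l : List String) (s : List String) :
    l.foldl (fun res c => PySem.Set.discard res c) s = s.filter (fun x => !l.contains x) := by
  induction l generalizing s with
  | nil => simp
  | cons a l ih =>
    rw [List.foldl_cons, ih]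
    simp only [PySem.Set.discard, List.filter_filter]
    refine List.filter_congr (fun x _ => ?_)
    simp only [List.contains_cons, Bool.not_or, pv_beq_comm x a]
    exact (Bool.and_comm _ _)

-- A's fold is a filter by "some entry hits and names x"
theorem pv_A_filter (revisions : List String) (pm : List (String × Option (List String))) (s : List String) :
    pm.foldl (fun simple_ancestors e =>
      match e.2 with
      | none => simple_ancestors
      | some parent_ids =>
          if parent_ids.any (fun parent_id => revisions.contains parent_id) then
            PySem.Set.discard simple_ancestors e.1
          else simple_ancestors) s
    = s.filter (fun x => !(pm.any (fun e => pvHit revisions e && e.1 == x))) := by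
  induction pm generalizing s with
  | nil => simp
  | cons e pm ih =>
    rcases e with ⟨rev, ps⟩
    rw [List.foldl_cons, ih]
    cases ps with
    | none =>
      refine List.filter_congr (fun x _ => ?_)
      simp [pvHit]
    | some parent_ids =>
      by_cases h : parent_ids.any (fun parent_id => revisions.contains parent_id) = true
      · simp only [h, if_true, PySem.Set.discard, List.filter_filter]
        refine List.filter_congr (fun x _ => ?_)
        simp only [List.any_cons, pvHit, h, Bool.true_and, Bool.not_or, pv_beq_comm x rev]
        exact (Bool.and_comm _ _)
      · simp only [Bool.eq_false_iff.mpr h]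
        refine List.filter_congr (fun x _ => ?_)
        simp only [List.any_cons, pvHit, Bool.eq_false_iff.mpr h, Bool.false_and, Bool.false_or]

-- B's outer fold is a filter by "some member of rl records x as a child"
theorem pv_B_filter (children : PySem.Dict String (List String)) (rl : List String) (s : List String) :
    rl.foldl (fun result r =>
      (children.getD r []).foldl (fun result child => PySem.Set.discard result child) result) s
    = s.filter (fun x => !(rl.any (fun r => (children.getD r []).contains x))) := by
  induction rl generalizing s with
  | nil => simp
  | cons r rl ih =>
    rw [List.foldl_cons, ih, pv_foldl_discard, List.filter_filter]
    refine List.filter_congr (fun x _ => ?_)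
    simp only [List.any_cons, Bool.not_or]
    exact (Bool.and_comm _ _)

-- getD of the reverse index, via the grouping lemma
theorem pv_children_getD (pm : List (String × Option (List String))) (r : String) :
    (pvChildrenIdx pm).getD r [] = ((pvPairs pm).filter (fun p => p.1 == r)).map (fun p => p.2) := by
  unfold pvChildrenIdx
  rw [PySem.Dict.getD_foldl_modify_append]
  simp

-- the two removal predicates agree
theorem pv_pred_eq (revisions : List String) (pm : List (String × Option (List String))) (x : String) :
    (pm.any (fun e => pvHit revisions e && e.1 == x))
    = (revisions.any (fun r => ((pvChildrenIdx pm).getD r []).contains x)) := by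
  rw [Bool.eq_iff_iff]
  simp only [List.any_eq_true, pv_children_getD, List.contains_iff_mem, List.mem_map,
    List.mem_filter, pvPairs, List.mem_flatMap, Bool.and_eq_true, beq_iff_eq]
  constructor
  · rintro ⟨⟨rev, ps⟩, he, hhit, hx⟩
    cases ps with
    | none => simp [pvHit] at hhit
    | some parent_ids =>
      simp only [pvHit, List.any_eq_true, List.contains_iff_mem] at hhit
      obtain ⟨p, hp, hpr⟩ := hhit
      refine ⟨p, hpr, ⟨(p, rev), ⟨⟨⟨rev, some parent_ids⟩, he, ?_⟩, rfl⟩, ?_⟩⟩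
      · simp only [List.mem_map]
        exact ⟨p, hp, rfl⟩
      · simpa using hx
  · rintro ⟨r, hr, ⟨q, ⟨⟨⟨rev, ps⟩, he, hq⟩, hq1⟩, hq2⟩⟩
    cases ps with
    | none => simp at hq
    | some parent_ids =>
      simp only [List.mem_map] at hq
      obtain ⟨p, hp, rfl⟩ := hq
      simp only at hq1 hq2
      refine ⟨⟨rev, some parent_ids⟩, he, ?_, hq2⟩
      simp only [pvHit, List.any_eq_true, List.contains_iff_mem]
      exact ⟨p, hp, by rw [hq1]; exact hr⟩

-- ===== VERDICT (by name: the statement is the Claim_ definition above) =====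
theorem remove_simple_descendants_py_spec : Claim_equal_remove_simple_descendants_py := by
  intro revisions parent_map _dom
  unfold Spec_remove_simple_descendants_py remove_simple_descendants_py remove_simple_descendants_py_alt
  rw [pv_A_filter, pv_B_filter]
  exact List.filter_congr (fun x _ => congrArg Bool.not (pv_pred_eq revisions parent_map x))
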